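-- pv_equiv track=rewrite | github.com/egoriwe999/s_and_p_blocks | p_block.py | p_block_forward
-- ===== SOURCE A (Python) =====
-- def p_block_forward(input_data):
--      table = [
--           1, 5, 2, 0, 3, 7, 4, 6
--      ]
--      output_data = 0
--      for i in range(8):
--           tetrad = (input_data >> i) & 0x1
--           output_data |= (tetrad << table[i])
--      return output_data
-- ===== SOURCE B (Python) =====
-- _TABLE = [1, 5, 2, 0, 3, 7, 4, 6]
--
--
-- def _build_lut():
--     # Doubling construction: after handling input bits 0..k the list holds the
--     # permuted value of every (k+1)-bit index, so 8 rounds yield all 256 bytes.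
--     lut = [0]
--     for pos in _TABLE:
--         bit = 1 << pos
--         lut = lut + [v | bit for v in lut]
--     return lut
--
--
-- _LUT = _build_lut()
--
--
-- def p_block_forward(input_data):
--     return _LUT[input_data & 0xFF]
-- ===== Notes on version B (the rewrite author's own statement) =====
-- stated objective: idiomatic
-- what changed: Replaced the per-call bit-scatter loop with a single index into a byte-indexed lookup table that is precomputed once by a doubling construction over the permutation's bit positions.
import Mathlib
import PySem

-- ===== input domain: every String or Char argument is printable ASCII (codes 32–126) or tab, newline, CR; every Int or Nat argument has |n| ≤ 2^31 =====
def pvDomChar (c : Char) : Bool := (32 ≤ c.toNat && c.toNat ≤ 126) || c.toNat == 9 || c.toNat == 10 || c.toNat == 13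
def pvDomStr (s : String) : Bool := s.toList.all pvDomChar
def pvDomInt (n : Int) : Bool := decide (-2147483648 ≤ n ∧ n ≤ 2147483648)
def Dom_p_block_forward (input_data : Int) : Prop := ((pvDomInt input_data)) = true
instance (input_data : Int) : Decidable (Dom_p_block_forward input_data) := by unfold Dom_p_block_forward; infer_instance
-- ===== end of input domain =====

-- B replaces the per-call bit-scatter loop by one lookup in a byte-indexed permutation
-- table built once by a doubling construction; objective: idiomatic (timing not measurable here).

-- ===== PORT A =====
def p_block_forward (input_data : Int) : Int :=
  let table : List Int := [1, 5, 2, 0, 3, 7, 4, 6]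
  (PySem.List.pyRange 0 8 1).foldl
    (fun output_data i =>
      let tetrad := PySem.Int.band (input_data >>> i.toNat) 1
      PySem.Int.bor output_data (tetrad <<< (PySem.List.pyGetD table i 0).toNat))
    0
  -- i and table[i] are in [0,8) on every iteration, so .toNat on the shift amounts is exact

-- ===== PORT B =====
def pvLUT : List Int :=
  [1, 5, 2, 0, 3, 7, 4, 6].foldl
    (fun lut pos => lut ++ lut.map (fun v => PySem.Int.bor v ((1 : Int) <<< pos)))
    ([0] : List Int)

def p_block_forward_alt (input_data : Int) : Int :=
  PySem.List.pyGetD pvLUT (PySem.Int.band input_data 255) 0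
  -- 0 ≤ input_data & 0xFF < 256 = pvLUT.length, so the Python index never raises

-- ===== PRECONDITION & SPEC =====
def Spec_p_block_forward (input_data : Int) (out : Int) : Prop := out = p_block_forward_alt input_data
instance (input_data : Int) (out : Int) : Decidable (Spec_p_block_forward input_data out) := by unfold Spec_p_block_forward; infer_instance

-- ===== CLAIM (what is proved, stated in full; the proofs are below) =====
def Claim_equal_p_block_forward : Prop := ∀ (input_data : Int), Dom_p_block_forward input_data → Spec_p_block_forward input_data (p_block_forward input_data)

-- ===== LEMMAS AND PROOFS =====

-- n & 255 is the (always nonnegative) low byte, i.e. n mod 256 with Python's floor mod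
theorem pv_band_255_eq_mod (n : Int) : PySem.Int.band n 255 = PySem.Int.mod n 256 := by
  rw [PySem.Int.mod_eq_emod_of_pos (by norm_num : (0:Int) < 256)]
  unfold PySem.Int.band
  have h255 : (255:Int).toNat = 255 := rfl
  by_cases h : 0 ≤ n
  · simp only [h, if_true, show (0:Int) ≤ 255 from by norm_num]
    have h1 : n.toNat &&& 255 = n.toNat % 256 := by
      have := Nat.and_two_pow_sub_one_eq_mod n.toNat 8
      norm_num at this
      exact this
    rw [h255, h1]
    omega
  · simp only [h, if_false, show (0:Int) ≤ 255 from by norm_num, if_true]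
    set k := (-n - 1).toNat with hk
    have h1 : 255 &&& k = k % 256 := by
      rw [Nat.land_comm]
      have := Nat.and_two_pow_sub_one_eq_mod k 8
      norm_num at this
      exact this
    rw [h255, h1]
    omega

-- bit i of n (i < 8) is determined by n mod 256
theorem pv_bit_reduce (n : Int) (i : Int) (h0 : 0 ≤ i) (h : i < 8) :
    PySem.Int.band (n >>> ((i.toNat : Int))) 1 = PySem.Int.band ((PySem.Int.mod n 256) >>> ((i.toNat : Int))) 1 := by
  rw [Int.shiftRight_natCast_right, Int.shiftRight_natCast_right,
      PySem.Int.band_one, PySem.Int.band_one,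
      Int.shiftRight_eq_div_pow, Int.shiftRight_eq_div_pow,
      PySem.Int.mod_eq_emod_of_pos (by norm_num : (0:Int) < 2),
      PySem.Int.mod_eq_emod_of_pos (by norm_num : (0:Int) < 2),
      PySem.Int.mod_eq_emod_of_pos (by norm_num : (0:Int) < 256)]
  interval_cases i <;>
    norm_num [show ∀ m : Nat, (Int.toNat (OfNat.ofNat m) : Nat) = OfNat.ofNat m from fun _ => rfl] <;>
    omega

-- A only reads the low byte of its input
theorem pv_A_reduce (n : Int) : p_block_forward n = p_block_forward (PySem.Int.mod n 256) := by
  have hr : PySem.List.pyRange 0 8 1 = [0, 1, 2, 3, 4, 5, 6, 7] := by decide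
  simp only [p_block_forward, hr, List.foldl]
  rw [pv_bit_reduce n 0 (by norm_num) (by norm_num), pv_bit_reduce n 1 (by norm_num) (by norm_num),
      pv_bit_reduce n 2 (by norm_num) (by norm_num), pv_bit_reduce n 3 (by norm_num) (by norm_num),
      pv_bit_reduce n 4 (by norm_num) (by norm_num), pv_bit_reduce n 5 (by norm_num) (by norm_num),
      pv_bit_reduce n 6 (by norm_num) (by norm_num), pv_bit_reduce n 7 (by norm_num) (by norm_num)]

-- A and B agree on every byte value
set_option maxRecDepth 40000 in
theorem pv_key : ∀ m : Fin 256, p_block_forward (m : Int) = p_block_forward_alt (m : Int) := by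
  decide

-- ===== VERDICT (by name: the statement is the Claim_ definition above) =====
theorem p_block_forward_spec : Claim_equal_p_block_forward := by
  intro n _
  unfold Spec_p_block_forward
  have h0 : 0 ≤ PySem.Int.mod n 256 := PySem.Int.mod_nonneg n (by norm_num)
  have h1 : PySem.Int.mod n 256 < 256 := PySem.Int.mod_lt n (by norm_num)
  have hm : ((PySem.Int.mod n 256).toNat : Int) = PySem.Int.mod n 256 := Int.toNat_of_nonneg h0
  have hfin := pv_key ⟨(PySem.Int.mod n 256).toNat, by omega⟩
  rw [show ((⟨(PySem.Int.mod n 256).toNat, by omega⟩ : Fin 256) : Int) = PySem.Int.mod n 256 from hm] at hfin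
  have halt : p_block_forward_alt n = p_block_forward_alt (PySem.Int.mod n 256) := by
    unfold p_block_forward_alt
    rw [pv_band_255_eq_mod, pv_band_255_eq_mod]
    rw [PySem.Int.mod_eq_emod_of_pos (by norm_num : (0:Int) < 256),
        PySem.Int.mod_eq_emod_of_pos (by norm_num : (0:Int) < 256), Int.emod_emod_of_dvd n (by norm_num)]
  rw [pv_A_reduce n, halt, hfin]
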